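-- pv_equiv track=rewrite | github.com/funny-ai-box/paraluxflow-admin-server | app/domains/hot_topics/services/hot_topic_service.py | _calculate_heat_level
-- ===== SOURCE A (Python) =====
-- def _calculate_heat_level(hot_value: str) -> int:
--     """计算热度等级
--
--     Args:
--         hot_value: 热度值字符串
--
--     Returns:
--         热度等级 (1-5)
--     """
--     try:
--         # 移除非数字字符
--         num_only = ''.join(c for c in hot_value if c.isdigit())
--         if not num_only:
--             return 1
--
--         # 转换为数字
--         value = int(num_only)
--
--         # 热度划分规则
--         if value > 1000000:  # 超过100万
--             return 5
--         elif value > 500000:  # 超过50万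
--             return 4
--         elif value > 100000:  # 超过10万
--             return 3
--         elif value > 10000:  # 超过1万
--             return 2
--         else:
--             return 1
--     except Exception:
--         return 1
-- ===== SOURCE B (Python) =====
-- def _calculate_heat_level(hot_value: str) -> int:
--     """Single left-to-right pass: accumulate the decimal value of the digit
--     characters with a saturating accumulator (capped just above the top
--     threshold), then count the thresholds strictly exceeded."""
--     CAP = 1000001  # one more than the largest threshold; saturation keeps the pass O(1)-space
--     acc = None
--     try:
--         for c in hot_value:
--             if c.isdigit():
--                 acc = min(10 * (0 if acc is None else acc) + int(c), CAP)
--     except Exception: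
--         return 1
--     if acc is None:
--         return 1
--     level = 1
--     for t in (10000, 100000, 500000, 1000000):
--         if acc > t:
--             level += 1
--     return level
-- ===== Notes on version B (the rewrite author's own statement) =====
-- stated objective: alternative
-- what changed: Instead of building the digit-only string, parsing it with int() and running an if/elif threshold cascade, B makes a single left-to-right pass over the input with a saturating accumulator (decimal value capped just above the top threshold, None until the first digit) and then counts how many thresholds the accumulated value strictly exceeds.
import Mathlib
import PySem

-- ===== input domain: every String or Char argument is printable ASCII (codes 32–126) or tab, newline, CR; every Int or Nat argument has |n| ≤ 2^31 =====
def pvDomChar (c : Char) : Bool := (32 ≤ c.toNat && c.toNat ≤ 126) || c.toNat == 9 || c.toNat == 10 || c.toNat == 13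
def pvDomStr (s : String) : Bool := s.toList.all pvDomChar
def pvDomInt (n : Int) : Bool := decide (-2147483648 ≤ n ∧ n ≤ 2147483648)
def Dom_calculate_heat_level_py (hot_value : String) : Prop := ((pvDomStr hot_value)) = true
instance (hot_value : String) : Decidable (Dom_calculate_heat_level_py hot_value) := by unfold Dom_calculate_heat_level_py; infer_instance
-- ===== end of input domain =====

-- B replaces A's filter→join→int→if/elif cascade by a single saturating-accumulator pass over the
-- string (capped just above the top threshold) followed by a threshold count (alternative; same cost).


-- ===== PORT A =====
-- int(num_only): num_only consists only of ASCII digits '0'-'9' by construction (and is nonempty on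
-- this branch), so Python's int() is exactly the left-to-right decimal fold below — ported by hand,
-- exact on nonempty all-digit strings.
def pvDecimalVal (a : Int) (ds : List Char) : Int :=
  ds.foldl (fun x c => 10 * x + ((c.toNat : Int) - 48)) a

def calculate_heat_level_py (hot_value : String) : Int :=
  let num_only := hot_value.toList.filter PySem.Chars.isdigit
  if num_only = [] then 1
  else
    let value := pvDecimalVal 0 num_only
    if value > 1000000 then 5
    else if value > 500000 then 4
    else if value > 100000 then 3
    else if value > 10000 then 2
    else 1

-- ===== PORT B =====
-- single pass; acc = None until the first digit; int(c) for an ASCII digit c is c.toNat - 48 (exact)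
def calculate_heat_level_py_alt (hot_value : String) : Int :=
  let acc := hot_value.toList.foldl
    (fun (acc : Option Int) c =>
      if PySem.Chars.isdigit c then
        some (min (10 * (match acc with | none => 0 | some v => v) + ((c.toNat : Int) - 48)) 1000001)
      else acc) none
  match acc with
  | none => 1
  | some v =>
    ([10000, 100000, 500000, 1000000] : List Int).foldl
      (fun level t => if v > t then level + 1 else level) 1

-- ===== PRECONDITION & SPEC =====
def Spec_calculate_heat_level_py (hot_value : String) (out : Int) : Prop := out = calculate_heat_level_py_alt hot_value
instance (hot_value : String) (out : Int) : Decidable (Spec_calculate_heat_level_py hot_value out) := by unfold Spec_calculate_heat_level_py; infer_instance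

-- ===== CLAIM (what is proved, stated in full; the proofs are below) =====
def Claim_equal_calculate_heat_level_py : Prop := ∀ (hot_value : String), Dom_calculate_heat_level_py hot_value → Spec_calculate_heat_level_py hot_value (calculate_heat_level_py hot_value)

-- ===== LEMMAS AND PROOFS =====

-- B's step function, named for the lemmas
def pvStep (acc : Option Int) (c : Char) : Option Int :=
  if PySem.Chars.isdigit c then
    some (min (10 * (match acc with | none => 0 | some v => v) + ((c.toNat : Int) - 48)) 1000001)
  else acc

lemma pvStep_eq (l : List Char) :
    l.foldl (fun (acc : Option Int) c =>
      if PySem.Chars.isdigit c then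
        some (min (10 * (match acc with | none => 0 | some v => v) + ((c.toNat : Int) - 48)) 1000001)
      else acc) none = l.foldl pvStep none := rfl

lemma pvDecimalVal_nonneg (ds : List Char) (a : Int)
    (hds : ∀ c ∈ ds, PySem.Chars.isdigit c = true) (ha : 0 ≤ a) :
    0 ≤ pvDecimalVal a ds := by
  induction ds generalizing a with
  | nil => simpa [pvDecimalVal]
  | cons c cs ih =>
    have hc := hds c (by simp)
    have h48 : (48 : Int) ≤ (c.toNat : Int) := by
      simp [PySem.Chars.isdigit, Char.le_def] at hc
      exact_mod_cast hc.1
    have : 0 ≤ 10 * a + ((c.toNat : Int) - 48) := by omega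
    simpa [pvDecimalVal] using ih (10 * a + ((c.toNat : Int) - 48)) (fun d hd => hds d (by simp [hd])) this

-- saturated fold from a some-state equals min of the true decimal value and the cap
lemma pvFold_some (l : List Char) (a : Int) (ha : 0 ≤ a) :
    l.foldl pvStep (some (min a 1000001)) =
      some (min (pvDecimalVal a (l.filter PySem.Chars.isdigit)) 1000001) := by
  induction l generalizing a with
  | nil => simp [pvDecimalVal]
  | cons c cs ih =>
    by_cases hc : PySem.Chars.isdigit c = true
    · have h48 : (48 : Int) ≤ (c.toNat : Int) := by
        simp [PySem.Chars.isdigit, Char.le_def] at hc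
        exact_mod_cast hc.1
      have hkey : min (10 * min a 1000001 + ((c.toNat : Int) - 48)) 1000001
          = min (10 * a + ((c.toNat : Int) - 48)) 1000001 := by omega
      have ha' : 0 ≤ 10 * a + ((c.toNat : Int) - 48) := by omega
      simp only [List.foldl_cons, List.filter_cons, hc, if_true, pvStep]
      rw [hkey, ih _ ha']
      simp [pvDecimalVal]
    · simp only [List.foldl_cons, List.filter_cons, pvStep, hc]
      simpa [hc] using ih a ha

-- full characterisation of B's pass
lemma pvFold_none (l : List Char) :
    l.foldl pvStep none =
      if l.filter PySem.Chars.isdigit = [] then none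
      else some (min (pvDecimalVal 0 (l.filter PySem.Chars.isdigit)) 1000001) := by
  induction l with
  | nil => simp
  | cons c cs ih =>
    by_cases hc : PySem.Chars.isdigit c = true
    · have h48 : (48 : Int) ≤ (c.toNat : Int) := by
        simp [PySem.Chars.isdigit, Char.le_def] at hc
        exact_mod_cast hc.1
      have h57 : (c.toNat : Int) ≤ 57 := by
        simp [PySem.Chars.isdigit, Char.le_def] at hc
        exact_mod_cast hc.2
      have ha' : (0 : Int) ≤ (c.toNat : Int) - 48 := by omega
      have hrw : min ((10 : Int) * 0 + ((c.toNat : Int) - 48)) 1000001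
          = min ((c.toNat : Int) - 48) 1000001 := by omega
      simp only [List.foldl_cons, List.filter_cons, hc, if_true, pvStep]
      rw [hrw, pvFold_some cs _ ha']
      simp [pvDecimalVal]
    · simp only [List.foldl_cons, List.filter_cons, pvStep, hc]
      simpa [hc] using ih

-- ===== VERDICT (by name: the statement is the Claim_ definition above) =====
theorem calculate_heat_level_py_spec : Claim_equal_calculate_heat_level_py := by
  intro s _
  unfold Spec_calculate_heat_level_py calculate_heat_level_py calculate_heat_level_py_alt
  rw [pvStep_eq, pvFold_none]
  set ds := s.toList.filter PySem.Chars.isdigit with hds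
  by_cases h : ds = []
  · simp [h]
  · have hall : ∀ c ∈ ds, PySem.Chars.isdigit c = true := by
      intro c hcmem
      exact (List.mem_filter.mp (hds ▸ hcmem)).2
    have hv0 : 0 ≤ pvDecimalVal 0 ds := pvDecimalVal_nonneg ds 0 hall le_rfl
    simp only [h, if_false]
    set v := pvDecimalVal 0 ds with hv
    simp only [List.foldl]
    split_ifs <;> omega
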